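-- pv_equiv track=rewrite | github.com/habibHadjar/algo | DeltaInList.py | Delta_Max_And_Min_In_List
-- ===== SOURCE A (Python) =====
-- def Delta_Max_And_Min_In_List(L):
--     delta_min = 0
--     delta_max = 0
--     index = 0
--     while index < len(L) - 1:
--         current_delta = (L[index] - L[index + 1]) * -1
--         if current_delta < delta_min:
--             delta_min = current_delta
--         elif current_delta > delta_max:
--             delta_max = current_delta
--         index += 1
--     return delta_min, delta_max
-- ===== SOURCE B (Python) =====
-- def Delta_Max_And_Min_In_List(L):
--     deltas = sorted(L[i + 1] - L[i] for i in range(len(L) - 1))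
--     if not deltas:
--         return 0, 0
--     return min(0, deltas[0]), max(0, deltas[-1])
-- ===== Notes on version B (the rewrite author's own statement) =====
-- stated objective: alternative
-- what changed: Replaces A's single streaming pass with two running accumulators by a sort-then-pick algorithm: sort the list of consecutive differences and read the extremes off the ends of the sorted list, clamping with 0.
import Mathlib
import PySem

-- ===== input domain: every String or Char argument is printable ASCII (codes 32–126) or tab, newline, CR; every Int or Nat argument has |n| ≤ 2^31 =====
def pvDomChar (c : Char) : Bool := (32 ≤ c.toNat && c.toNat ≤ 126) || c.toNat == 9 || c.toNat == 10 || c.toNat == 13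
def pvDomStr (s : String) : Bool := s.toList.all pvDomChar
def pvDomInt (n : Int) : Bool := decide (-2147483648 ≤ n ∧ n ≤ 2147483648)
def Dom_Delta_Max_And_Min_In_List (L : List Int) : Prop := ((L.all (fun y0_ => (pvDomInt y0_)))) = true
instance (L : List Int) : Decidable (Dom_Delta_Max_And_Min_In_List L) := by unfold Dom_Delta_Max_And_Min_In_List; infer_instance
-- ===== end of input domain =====

-- B replaces A's single streaming pass (two running accumulators) by a sort-then-pick
-- algorithm: sort the consecutive differences, read the extremes off the sorted list's
-- ends, clamp with 0; objective: alternative.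

-- ===== PORT A =====
-- the while loop of A, state (delta_min, delta_max, index); condition index < len(L)-1
def pvALoop (L : List Int) (dmin dmax : Int) (index : Nat) : Int × Int :=
  if _h : index + 1 < L.length then
    let cd := (L.getD index 0 - L.getD (index + 1) 0) * (-1)
    if cd < dmin then pvALoop L cd dmax (index + 1)
    else if cd > dmax then pvALoop L dmin cd (index + 1)
    else pvALoop L dmin dmax (index + 1)
  else (dmin, dmax)
termination_by L.length - index

def Delta_Max_And_Min_In_List (L : List Int) : Int × Int :=
  pvALoop L 0 0 0

-- ===== PORT B =====
-- deltas = sorted(L[i+1]-L[i] for i in range(len(L)-1)); empty → (0,0);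
-- else (min(0, deltas[0]), max(0, deltas[-1])) — deltas[-1] is getLast of the nonempty list
def pvDeltasSorted (L : List Int) : List Int :=
  PySem.List.sorted ((List.range (L.length - 1)).map (fun i => L.getD (i + 1) 0 - L.getD i 0)) (fun x => x) false

def Delta_Max_And_Min_In_List_alt (L : List Int) : Int × Int :=
  match pvDeltasSorted L with
  | [] => (0, 0)
  | h :: t => (min 0 h, max 0 ((h :: t).getLast (by simp)))

-- ===== PRECONDITION & SPEC =====
def Spec_Delta_Max_And_Min_In_List (L : List Int) (out : Int × Int) : Prop := out = Delta_Max_And_Min_In_List_alt L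
instance (L : List Int) (out : Int × Int) : Decidable (Spec_Delta_Max_And_Min_In_List L out) := by unfold Spec_Delta_Max_And_Min_In_List; infer_instance

-- ===== CLAIM (what is proved, stated in full; the proofs are below) =====
def Claim_equal_Delta_Max_And_Min_In_List : Prop := ∀ (L : List Int), Dom_Delta_Max_And_Min_In_List L → Spec_Delta_Max_And_Min_In_List L (Delta_Max_And_Min_In_List L)

-- ===== LEMMAS AND PROOFS =====

-- the (unsorted) consecutive differences
def pvDeltas (L : List Int) : List Int :=
  (List.range (L.length - 1)).map (fun i => L.getD (i + 1) 0 - L.getD i 0)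

-- remaining consecutive differences from position i
def pvTailDeltas (L : List Int) (i : Nat) : List Int :=
  (List.range (L.length - 1 - i)).map (fun j => L.getD (i + j + 1) 0 - L.getD (i + j) 0)

lemma pvTailDeltas_cons (L : List Int) (i : Nat) (h : i + 1 < L.length) :
    pvTailDeltas L i = (L.getD (i + 1) 0 - L.getD i 0) :: pvTailDeltas L (i + 1) := by
  unfold pvTailDeltas
  have hn : L.length - 1 - i = (L.length - 1 - (i + 1)) + 1 := by omega
  rw [hn, List.range_succ_eq_map, List.map_cons, List.map_map]
  simp [Function.comp, Nat.add_comm, Nat.add_assoc, Nat.add_left_comm]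

lemma pvALoop_eq (L : List Int) : ∀ (i : Nat) (dmin dmax : Int), dmin ≤ dmax →
    pvALoop L dmin dmax i = ((pvTailDeltas L i).foldl min dmin, (pvTailDeltas L i).foldl max dmax) := by
  intro i
  induction' hn : L.length - i using Nat.strong_induction_on with n ih generalizing i
  intro dmin dmax hle
  rw [pvALoop]
  by_cases h : i + 1 < L.length
  · rw [pvTailDeltas_cons L i h]
    simp only [h, dif_pos, List.foldl_cons]
    set cd := (L.getD i 0 - L.getD (i + 1) 0) * (-1) with hcd
    have hcd' : L.getD (i + 1) 0 - L.getD i 0 = cd := by rw [hcd]; ring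
    rw [hcd']
    have hrec : ∀ dm dM : Int, dm ≤ dM →
        pvALoop L dm dM (i + 1) = ((pvTailDeltas L (i + 1)).foldl min dm, (pvTailDeltas L (i + 1)).foldl max dM) := by
      intro dm dM hd
      exact ih (L.length - (i + 1)) (by omega) (i + 1) rfl dm dM hd
    split_ifs with h1 h2
    · rw [hrec cd dmax (le_trans (le_of_lt h1) hle)]
      congr 1
      · congr 1; omega
      · congr 1; omega
    · rw [hrec dmin cd (le_trans hle (le_of_lt h2))]
      congr 1
      · congr 1; omega
      · congr 1; omega
    · rw [hrec dmin dmax hle]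
      congr 1
      · congr 1; omega
      · congr 1; omega
  · simp only [h, dif_neg, not_false_iff]
    have : L.length - 1 - i = 0 := by omega
    simp [pvTailDeltas, this]

lemma pvTailDeltas_zero (L : List Int) : pvTailDeltas L 0 = pvDeltas L := by
  unfold pvTailDeltas pvDeltas
  simp

-- foldl min stays fixed when the seed is below every element
lemma foldl_min_of_le (c : Int) : ∀ (t : List Int), (∀ x ∈ t, c ≤ x) → t.foldl min c = c := by
  intro t
  induction t generalizing c with
  | nil => intro _; rfl
  | cons x t ih =>
      intro h
      have hx : c ≤ x := h x (by simp)
      simp only [List.foldl_cons, min_eq_left hx]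
      exact ih c (fun y hy => h y (by simp [hy]))

-- on a ≤-sorted nonempty list, foldl min from c is min c head
lemma foldl_min_sorted (c h : Int) (t : List Int) (hp : (h :: t).Pairwise (· ≤ ·)) :
    (h :: t).foldl min c = min c h := by
  simp only [List.foldl_cons]
  apply foldl_min_of_le
  intro x hx
  exact le_trans (min_le_right c h) ((List.pairwise_cons.mp hp).1 x hx)

-- on a ≤-sorted nonempty list, foldl max from c is max c last
lemma foldl_max_sorted : ∀ (t : List Int) (c h : Int), (h :: t).Pairwise (· ≤ ·) →
    (h :: t).foldl max c = max c ((h :: t).getLast (by simp)) := by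
  intro t
  induction t with
  | nil => intro c h _; simp
  | cons y t ih =>
      intro c h hp
      have hp' : (y :: t).Pairwise (· ≤ ·) := (List.pairwise_cons.mp hp).2
      have hhy : h ≤ (y :: t).getLast (by simp) :=
        (List.pairwise_cons.mp hp).1 _ (List.getLast_mem _)
      have := ih (max c h) y hp'
      simp only [List.foldl_cons] at this ⊢
      rw [this]
      rw [show ((h :: y :: t).getLast (by simp)) = ((y :: t).getLast (by simp)) from
        List.getLast_cons (by simp)]
      rw [max_assoc]
      congr 1
      exact max_eq_right hhy

-- foldl min / max are permutation-invariant
lemma foldl_min_perm {l₁ l₂ : List Int} (hp : l₁.Perm l₂) (c : Int) :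
    l₁.foldl min c = l₂.foldl min c := by
  have : RightCommutative (min : Int → Int → Int) := ⟨fun b a₁ a₂ => by
    simp [min_assoc, min_comm a₁ a₂]⟩
  exact hp.foldl_eq c

lemma foldl_max_perm {l₁ l₂ : List Int} (hp : l₁.Perm l₂) (c : Int) :
    l₁.foldl max c = l₂.foldl max c := by
  have : RightCommutative (max : Int → Int → Int) := ⟨fun b a₁ a₂ => by
    simp [max_assoc, max_comm a₁ a₂]⟩
  exact hp.foldl_eq c

-- ===== VERDICT (by name: the statement is the Claim_ definition above) =====
theorem Delta_Max_And_Min_In_List_spec : Claim_equal_Delta_Max_And_Min_In_List := by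
  intro L _
  unfold Spec_Delta_Max_And_Min_In_List Delta_Max_And_Min_In_List Delta_Max_And_Min_In_List_alt
  rw [pvALoop_eq L 0 0 0 le_rfl, pvTailDeltas_zero]
  have hperm : (pvDeltasSorted L).Perm (pvDeltas L) := PySem.List.sorted_perm ..
  have hpair : (pvDeltasSorted L).Pairwise (· ≤ ·) := by
    have := PySem.List.sorted_pairwise (xs := pvDeltas L) (key := fun x => x)
    exact this
  rw [foldl_min_perm hperm.symm 0, foldl_max_perm hperm.symm 0]
  cases hs : pvDeltasSorted L with
  | nil => simp
  | cons h t =>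
      rw [hs] at hpair
      rw [foldl_min_sorted 0 h t hpair, foldl_max_sorted t 0 h hpair]
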